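-- pv_equiv track=rewrite | github.com/mit4351/Reversi | wx/ReverseCommon.py | has_lower_reversible_stone
-- ===== SOURCE A (Python) =====
-- NONE = None # 何も置かれていない
--
-- def has_lower_reversible_stone(stone_status, i, j, color):
--     enemy = not(bool(color))
--     if i <= 5 and stone_status[i+1][j] == enemy:
--         for k in range(i + 2, 8):
--             if stone_status[k][j] == color:
--                 return True
--             elif stone_status[k][j] == NONE:
--                 break
--     return False
-- ===== SOURCE B (Python) =====
-- def has_lower_reversible_stone(stone_status, i, j, color):
--     if i > 5:
--         return False
--     enemy = not bool(color)
--
--     def run_end(k):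
--         # smallest row index >= k (capped at 8) whose cell is not an enemy stone
--         if k <= 7 and stone_status[k][j] == enemy:
--             return run_end(k + 1)
--         return k
--
--     k = run_end(i + 1)
--     return i + 1 < k <= 7 and stone_status[k][j] == color
-- ===== Notes on version B (the rewrite author's own statement) =====
-- stated objective: alternative
-- what changed: Instead of A's immediate-neighbour guard plus flag-driven inner scan, B recursively computes the boundary index where the run of enemy stones below row i ends and decides with a single arithmetic/cell test on that index (i+1 < k <= 7 and cell(k) == color).
import Mathlib
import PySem

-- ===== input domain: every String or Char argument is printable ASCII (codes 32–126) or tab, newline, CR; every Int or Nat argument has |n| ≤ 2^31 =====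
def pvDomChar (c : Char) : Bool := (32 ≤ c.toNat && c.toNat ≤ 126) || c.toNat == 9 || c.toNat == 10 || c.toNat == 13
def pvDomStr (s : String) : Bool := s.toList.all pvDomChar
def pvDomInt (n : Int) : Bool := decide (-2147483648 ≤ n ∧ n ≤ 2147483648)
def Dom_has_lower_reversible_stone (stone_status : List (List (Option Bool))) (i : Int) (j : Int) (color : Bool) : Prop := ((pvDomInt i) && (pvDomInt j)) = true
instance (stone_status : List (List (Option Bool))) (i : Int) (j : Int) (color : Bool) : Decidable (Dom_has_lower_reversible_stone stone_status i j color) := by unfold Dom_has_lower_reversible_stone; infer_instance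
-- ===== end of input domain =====

-- B replaces A's guard-plus-flag scan by a recursion that returns the boundary index of the
-- enemy run below row i and one final test on that index (objective: alternative, same cost).

-- ss[k][j] as an Option Bool; the default `none` is only reached outside Pre_ (where Python raises)
def pvCell (stone_status : List (List (Option Bool))) (k : Int) (j : Int) : Option Bool :=
  match PySem.List.pyGet? stone_status k with
  | some row => (PySem.List.pyGet? row j).getD none
  | none => none

-- ===== PORT A =====
-- the inner `for k in range(i+2, 8)` with its return True / break
def pvLoopA (stone_status : List (List (Option Bool))) (j : Int) (color : Bool) : List Int → Bool
  | [] => false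
  | k :: ks =>
    if pvCell stone_status k j = some color then true
    else if pvCell stone_status k j = none then false
    else pvLoopA stone_status j color ks

def has_lower_reversible_stone (stone_status : List (List (Option Bool))) (i : Int) (j : Int) (color : Bool) : Bool :=
  let enemy := !color
  if i ≤ 5 ∧ pvCell stone_status (i + 1) j = some enemy then
    pvLoopA stone_status j color (PySem.List.pyRange (i + 2) 8 1)
  else false

-- ===== PORT B =====
-- `run_end`: smallest row index ≥ k (capped at 8) whose cell is not an enemy stone
def pvRunEnd (stone_status : List (List (Option Bool))) (j : Int) (enemy : Bool) (k : Int) : Int :=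
  if k ≤ 7 ∧ pvCell stone_status k j = some enemy then
    pvRunEnd stone_status j enemy (k + 1)
  else k
termination_by (8 - k).toNat
decreasing_by omega

def has_lower_reversible_stone_alt (stone_status : List (List (Option Bool))) (i : Int) (j : Int) (color : Bool) : Bool :=
  if i > 5 then false
  else
    let k := pvRunEnd stone_status j (!color) (i + 1)
    decide (i + 1 < k) && decide (k ≤ 7) && decide (pvCell stone_status k j = some color)

-- ===== PRECONDITION & SPEC =====
-- ss[k][j], defined (no IndexError) or not
def pvCellAt (stone_status : List (List (Option Bool))) (k : Int) (j : Int) : Option (Option Bool) :=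
  (PySem.List.pyGet? stone_status k).bind (fun row => PySem.List.pyGet? row j)

-- Pre_ excludes exactly the inputs where Python A raises IndexError: with i ≤ 5, cell (i+1,j) must
-- exist, and each further cell (k,j), k < 8, must exist whenever all cells strictly above it (from
-- row i+1) held the enemy colour — precisely the cells A inspects.  (The max(…)/length clause only
-- keeps the range short for very negative i, where the first access is out of range anyway.)
def Pre_has_lower_reversible_stone (stone_status : List (List (Option Bool))) (i : Int) (j : Int) (color : Bool) : Prop :=
  (i ≤ 5 → -(stone_status.length : Int) ≤ i + 1) ∧
  (i ≤ 5 → ∀ k ∈ PySem.List.pyRange (max (i + 1) (-(stone_status.length : Int))) 8 1,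
      (∀ m ∈ PySem.List.pyRange (max (i + 1) (-(stone_status.length : Int))) k 1,
          pvCellAt stone_status m j = some (some (!color))) →
      pvCellAt stone_status k j ≠ none)
instance (stone_status : List (List (Option Bool))) (i : Int) (j : Int) (color : Bool) : Decidable (Pre_has_lower_reversible_stone stone_status i j color) := by unfold Pre_has_lower_reversible_stone; infer_instance

def pvWitness_has_lower_reversible_stone : List (List (Option Bool)) × Int × Int × Bool :=
  ([[some true, some false], [some false, some true], [some true, some true]], 0, 1, true)

def Spec_has_lower_reversible_stone (stone_status : List (List (Option Bool))) (i : Int) (j : Int) (color : Bool) (out : Bool) : Prop := out = has_lower_reversible_stone_alt stone_status i j color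
instance (stone_status : List (List (Option Bool))) (i : Int) (j : Int) (color : Bool) (out : Bool) : Decidable (Spec_has_lower_reversible_stone stone_status i j color out) := by unfold Spec_has_lower_reversible_stone; infer_instance

-- ===== CLAIM (what is proved, stated in full; the proofs are below) =====
def Claim_equal_has_lower_reversible_stone : Prop := ∀ (stone_status : List (List (Option Bool))) (i : Int) (j : Int) (color : Bool), Dom_has_lower_reversible_stone stone_status i j color → Pre_has_lower_reversible_stone stone_status i j color → Spec_has_lower_reversible_stone stone_status i j color (has_lower_reversible_stone stone_status i j color)

-- ===== LEMMAS AND PROOFS =====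

-- the boundary index never moves backwards
lemma pvRunEnd_ge (stone_status : List (List (Option Bool))) (j : Int) (enemy : Bool) :
    ∀ k : Int, k ≤ pvRunEnd stone_status j enemy k := by
  intro k
  induction hn : (8 - k).toNat using Nat.strong_induction_on generalizing k with
  | _ n ih =>
    rw [pvRunEnd]
    split
    · rename_i h
      have := ih (8 - (k + 1)).toNat (by omega) (k + 1) rfl
      omega
    · omega

-- A's inner loop over [m, 8) computes exactly B's boundary test at pvRunEnd m
lemma loopA_runEnd (stone_status : List (List (Option Bool))) (j : Int) (color : Bool) :
    ∀ m : Int, pvLoopA stone_status j color (PySem.List.pyRange m 8 1)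
      = (decide (pvRunEnd stone_status j (!color) m ≤ 7) &&
         decide (pvCell stone_status (pvRunEnd stone_status j (!color) m) j = some color)) := by
  intro m
  induction hn : (8 - m).toNat using Nat.strong_induction_on generalizing m with
  | _ n ih =>
    by_cases hm : m ≤ 7
    · rw [PySem.List.pyRange_one_cons (by omega : m < 8)]
      simp only [pvLoopA]
      rcases hc : pvCell stone_status m j with _ | b
      · -- cell is NONE: A breaks; B's boundary is m with a non-color cell
        rw [pvRunEnd]
        simp [hc]
      · by_cases hb : b = color
        · subst hb
          rw [pvRunEnd]
          simp [hc, hm, Bool.eq_not_self]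
        · have hbe : b = !color := by cases b <;> cases color <;> simp_all
          subst hbe
          have hne : ¬ ((some (!color) : Option Bool) = some color) := by simp [Bool.eq_not_self]
          rw [pvRunEnd]
          simp only [hc, hm, true_and, hne]
          simp only [if_false]
          exact ih (8 - (m + 1)).toNat (by omega) (m + 1) rfl
    · rw [pvRunEnd]
      have hr : PySem.List.pyRange m 8 1 = [] := by
        simp [PySem.List.pyRange]; omega
      simp [hr, pvLoopA, hm]

lemma main_eq (stone_status : List (List (Option Bool))) (i : Int) (j : Int) (color : Bool) :
    has_lower_reversible_stone stone_status i j color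
      = has_lower_reversible_stone_alt stone_status i j color := by
  unfold has_lower_reversible_stone has_lower_reversible_stone_alt
  by_cases hi : i ≤ 5
  · rw [if_neg (by omega : ¬ i > 5)]
    by_cases hc : pvCell stone_status (i + 1) j = some (!color)
    · rw [if_pos ⟨hi, hc⟩]
      have hstep : pvRunEnd stone_status j (!color) (i + 1)
          = pvRunEnd stone_status j (!color) (i + 2) := by
        rw [pvRunEnd, if_pos ⟨by omega, hc⟩]
        have h2 : i + 1 + 1 = i + 2 := by ring
        rw [h2]
      have hge : i + 2 ≤ pvRunEnd stone_status j (!color) (i + 2) :=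
        pvRunEnd_ge stone_status j (!color) (i + 2)
      rw [loopA_runEnd stone_status j color (i + 2)]
      simp only [hstep]
      have : decide (i + 1 < pvRunEnd stone_status j (!color) (i + 2)) = true := by
        simp; omega
      rw [this, Bool.true_and]
    · rw [if_neg (by tauto)]
      have hend : pvRunEnd stone_status j (!color) (i + 1) = i + 1 := by
        rw [pvRunEnd, if_neg (by tauto)]
      simp [hend]
  · rw [if_neg (by tauto), if_pos (by omega : i > 5)]

-- ===== VERDICT (by name: the statement is the Claim_ definition above) =====
theorem has_lower_reversible_stone_spec : Claim_equal_has_lower_reversible_stone := by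
  intro ss i j color _ _
  unfold Spec_has_lower_reversible_stone
  exact main_eq ss i j color
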